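-- pv_equiv track=rewrite | github.com/hammady/wwpray | scraper/sources/bases/tma.py | _find_nearest_day
-- ===== SOURCE A (Python) =====
-- def _find_nearest_day(day_of_year, days):
--     # find the nearest day in the list of days
--     started_on = day_of_year
--     while True:
--         if str(day_of_year) in days:
--             return days[str(day_of_year)]
--         day_of_year -= 1
--         if day_of_year < 1:
--             day_of_year = 366
--         if day_of_year == started_on:
--             return None
-- ===== SOURCE B (Python) =====
-- def _find_nearest_day(day_of_year, days):
--     # collect the day-numbers actually present (canonical keys "1".."366")
--     present = [n for n in range(1, 367) if str(n) in days]
--     if not present: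
--         return None
--     prior = [n for n in present if n <= day_of_year]
--     best = max(prior) if prior else max(present)
--     return days[str(best)]
-- ===== Notes on version B (the rewrite author's own statement) =====
-- stated objective: simpler
-- what changed: Replaces the backward cyclic while-loop over successive day numbers with a single collection of the canonical day keys present (1..366) followed by a max-selection: max of those <= day_of_year, else max of all (the wraparound).
-- outside the precondition, e.g. on _find_nearest_day(400, {'400': ['x']}): A returns ['x'], B returns None; on _find_nearest_day(0, {}): A does not finish within the time limit, B returns None
import Mathlib
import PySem

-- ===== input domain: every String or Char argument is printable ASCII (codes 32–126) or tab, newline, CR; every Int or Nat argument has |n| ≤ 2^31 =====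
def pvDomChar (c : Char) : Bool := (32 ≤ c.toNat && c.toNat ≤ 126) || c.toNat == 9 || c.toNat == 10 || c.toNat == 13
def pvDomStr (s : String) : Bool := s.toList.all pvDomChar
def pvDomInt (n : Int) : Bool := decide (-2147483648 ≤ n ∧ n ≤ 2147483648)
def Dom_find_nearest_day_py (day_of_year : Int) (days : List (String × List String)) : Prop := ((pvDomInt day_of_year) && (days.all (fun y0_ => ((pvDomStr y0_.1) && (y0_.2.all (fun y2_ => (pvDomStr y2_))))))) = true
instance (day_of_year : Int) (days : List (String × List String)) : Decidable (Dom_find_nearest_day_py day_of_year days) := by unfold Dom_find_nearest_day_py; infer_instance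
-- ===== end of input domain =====

-- B replaces A's backward cyclic while-loop with one collection of the present day keys
-- and a max-selection (simpler); equivalence is proved on the natural domain 1 ≤ day_of_year ≤ 366.

-- shared: 'str(k) in days' / 'days[str(k)]' on the association list (first match)
def pvLookup (days : List (String × List String)) (s : String) : Option (List String) :=
  (days.find? (fun kv => kv.1 == s)).map (·.2)

-- ===== PORT A =====
-- A's 'while True' loop; fuel 367 covers every iteration the loop performs on the
-- precondition's domain (the loop visits at most the 366 distinct day numbers once)
def pvFindLoop (days : List (String × List String)) (started : Int) : Int → Nat → Option (List String)
  | _, 0 => none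
  | d, Nat.succ f =>
    match pvLookup days (PySem.Int.toStr d) with
    | some v => some v
    | none =>
      let d1 := d - 1
      let d2 := if d1 < 1 then 366 else d1
      if d2 = started then none else pvFindLoop days started d2 f

def find_nearest_day_py (day_of_year : Int) (days : List (String × List String)) : Option (List String) :=
  pvFindLoop days day_of_year day_of_year 367

-- ===== PORT B =====
def find_nearest_day_py_alt (day_of_year : Int) (days : List (String × List String)) : Option (List String) :=
  let present := (PySem.List.pyRange 1 367 1).filter (fun n => (pvLookup days (PySem.Int.toStr n)).isSome)
  if present.isEmpty then none
  else
    let prior := present.filter (fun n => decide (n ≤ day_of_year))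
    let best : Int :=
      if prior.isEmpty then (PySem.List.max? present (fun x => x)).getD 0
      else (PySem.List.max? prior (fun x => x)).getD 0
    pvLookup days (PySem.Int.toStr best)

-- ===== PRECONDITION & SPEC =====
-- Pre_ restricts to the natural day-of-year domain 1..366: outside it A either loops forever
-- (when no canonical key "1".."366" is present) or matches keys above 366 / below 1 that a
-- day-of-year lookup is never meant to see.
def Pre_find_nearest_day_py (day_of_year : Int) (days : List (String × List String)) : Prop :=
  1 ≤ day_of_year ∧ day_of_year ≤ 366
instance (day_of_year : Int) (days : List (String × List String)) : Decidable (Pre_find_nearest_day_py day_of_year days) := by unfold Pre_find_nearest_day_py; infer_instance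

def pvWitness_find_nearest_day_py : Int × (List (String × List String)) := (5, [("3", ["a"])])

def Spec_find_nearest_day_py (day_of_year : Int) (days : List (String × List String)) (out : Option (List String)) : Prop := out = find_nearest_day_py_alt day_of_year days
instance (day_of_year : Int) (days : List (String × List String)) (out : Option (List String)) : Decidable (Spec_find_nearest_day_py day_of_year days out) := by unfold Spec_find_nearest_day_py; infer_instance

-- ===== CLAIM (what is proved, stated in full; the proofs are below) =====
def Claim_equal_find_nearest_day_py : Prop := ∀ (day_of_year : Int) (days : List (String × List String)), Dom_find_nearest_day_py day_of_year days → Pre_find_nearest_day_py day_of_year days → Spec_find_nearest_day_py day_of_year days (find_nearest_day_py day_of_year days)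

-- ===== LEMMAS AND PROOFS =====

-- proof-only: backward scan returning the first (= greatest) day number with a present key
def pvScan (days : List (String × List String)) : Int → Nat → Option Int
  | _, 0 => none
  | a, Nat.succ k =>
    if (pvLookup days (PySem.Int.toStr a)).isSome then some a else pvScan days (a - 1) k

theorem pv_max_append_last (l : List Int) (a : Int) (h : ∀ x ∈ l, x ≤ a) :
    PySem.List.max? (l ++ [a]) (fun x => x) = some a := by
  cases hm : PySem.List.max? (l ++ [a]) (fun x => x) with
  | none => exact absurd ((PySem.List.max?_eq_none_iff _ _).mp hm) (by simp)
  | some m =>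
    have hmem := PySem.List.max?_mem hm
    have hmax : a ≤ m := by simpa using PySem.List.max?_isMax hm a (by simp)
    have hle : m ≤ a := by
      rcases List.mem_append.mp hmem with h1 | h1
      · exact h m h1
      · simp at h1; omega
    congr 1; omega

-- pvScan a k = max of the present day numbers in (a-k, a]
theorem pvScan_eq_max (days : List (String × List String)) (k : Nat) :
    ∀ a : Int, pvScan days a k =
      PySem.List.max? ((PySem.List.pyRange (a + 1 - k) (a + 1) 1).filter
        (fun n => (pvLookup days (PySem.Int.toStr n)).isSome)) (fun x => x) := by
  induction k with
  | zero =>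
    intro a
    rw [PySem.List.pyRange_one_eq_nil (by omega)]
    simp only [List.filter_nil, pvScan]
    exact ((PySem.List.max?_eq_none_iff _ _).mpr rfl).symm
  | succ k ih =>
    intro a
    have hsplit : PySem.List.pyRange (a + 1 - ((k + 1 : Nat) : Int)) (a + 1) 1 =
        PySem.List.pyRange (a + 1 - ((k + 1 : Nat) : Int)) a 1 ++ [a] :=
      PySem.List.pyRange_one_succ_right (by push_cast; omega)
    rw [hsplit, List.filter_append]
    by_cases hhit : (pvLookup days (PySem.Int.toStr a)).isSome
    · have h2 : (List.filter (fun n => (pvLookup days (PySem.Int.toStr n)).isSome) [a]) = [a] := by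
        simp [hhit]
      rw [h2]
      have h3 : pvScan days a (k + 1) = some a := by simp [pvScan, hhit]
      rw [h3]
      refine (pv_max_append_last _ a ?_).symm
      intro x hx
      have hx2 := PySem.List.mem_pyRange_one.mp (List.mem_of_mem_filter hx)
      omega
    · have h2 : (List.filter (fun n => (pvLookup days (PySem.Int.toStr n)).isSome) [a]) = [] := by
        simp [hhit]
      rw [h2, List.append_nil]
      have h3 : pvScan days a (k + 1) = pvScan days (a - 1) k := by simp [pvScan, hhit]
      rw [h3, ih (a - 1)]
      have e1 : a - 1 + 1 - ((k : Nat) : Int) = a + 1 - ((k + 1 : Nat) : Int) := by push_cast; omega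
      have e2 : a - 1 + 1 = a := by omega
      rw [e1, e2]

-- the loop's result, characterised by the two backward scans (below started, then wrapped)
theorem pvFindLoop_eq_scan (days : List (String × List String)) (s : Int)
    (hs1 : 1 ≤ s) (hs2 : s ≤ 366) :
    ∀ (f : Nat) (d : Int), 1 ≤ d → d ≤ 366 →
      (if d ≤ s then d.toNat + (366 - s).toNat else (d - s).toNat) ≤ f →
      pvFindLoop days s d f =
        (if d ≤ s then (pvScan days d d.toNat).or (pvScan days 366 (366 - s).toNat)
         else pvScan days d (d - s).toNat).bind
          (fun n => pvLookup days (PySem.Int.toStr n)) := by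
  intro f
  induction f with
  | zero =>
    intro d hd1 hd2 hfuel
    split_ifs at hfuel with h <;> omega
  | succ f ih =>
    intro d hd1 hd2 hfuel
    by_cases hhit : (pvLookup days (PySem.Int.toStr d)).isSome
    · obtain ⟨v, hv⟩ := Option.isSome_iff_exists.mp hhit
      have hL : pvFindLoop days s d (f + 1) = some v := by
        simp [pvFindLoop, hv]
      rw [hL]
      split_ifs with hds
      · have hscan : pvScan days d d.toNat = some d := by
          rw [show d.toNat = (d.toNat - 1) + 1 by omega]
          simp [pvScan, hhit]
        rw [hscan, Option.some_or]
        simp [hv]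
      · have hscan : pvScan days d (d - s).toNat = some d := by
          rw [show (d - s).toNat = ((d - s).toNat - 1) + 1 by omega]
          simp [pvScan, hhit]
        rw [hscan]
        simp [hv]
    · have hv : pvLookup days (PySem.Int.toStr d) = none := Option.not_isSome_iff_eq_none.mp hhit
      by_cases hd1' : d = 1
      · subst hd1'
        have hL : pvFindLoop days s 1 (f + 1) =
            if (366 : Int) = s then none else pvFindLoop days s 366 f := by
          simp [pvFindLoop, hv]
        have hscanempty : pvScan days 1 (1 : Int).toNat = none := by
          simp [pvScan, hhit]
        rw [hL, if_pos hs1, hscanempty, Option.none_or]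
        by_cases hsw : (366 : Int) = s
        · rw [if_pos hsw]
          rw [show (366 - s).toNat = 0 by omega]
          simp [pvScan]
        · rw [if_neg hsw]
          have h1 := ih 366 (by omega) (by omega)
            (by rw [if_neg (by omega)]; rw [if_pos hs1] at hfuel; omega)
          rw [h1, if_neg (by omega)]
      · have hge2 : 2 ≤ d := by omega
        have hL : pvFindLoop days s d (f + 1) =
            if d - 1 = s then none else pvFindLoop days s (d - 1) f := by
          simp only [pvFindLoop, hv]
          rw [show (if d - 1 < 1 then (366:Int) else d - 1) = d - 1 from if_neg (by omega)]
        by_cases hstop : d - 1 = s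
        · rw [hL, if_pos hstop]
          have hdgt : ¬ d ≤ s := by omega
          rw [if_neg hdgt, show (d - s).toNat = 1 by omega]
          simp [pvScan, hhit]
        · rw [hL, if_neg hstop]
          by_cases hds : d ≤ s
          · have h1 := ih (d - 1) (by omega) (by omega)
              (by rw [if_pos (by omega)]; rw [if_pos hds] at hfuel; omega)
            rw [h1, if_pos (by omega), if_pos hds]
            have hstep : pvScan days d d.toNat = pvScan days (d - 1) (d - 1).toNat := by
              rw [show d.toNat = (d - 1).toNat + 1 by omega]
              simp [pvScan, hhit]
            rw [hstep]
          · have h1 := ih (d - 1) (by omega) (by omega)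
              (by rw [if_neg (by omega)]; rw [if_neg hds] at hfuel; omega)
            rw [h1, if_neg (by omega), if_neg hds]
            have hstep : pvScan days d (d - s).toNat = pvScan days (d - 1) (d - 1 - s).toNat := by
              rw [show (d - s).toNat = (d - 1 - s).toNat + 1 by omega]
              simp [pvScan, hhit]
            rw [hstep]

-- ===== VERDICT (by name: the statement is the Claim_ definition above) =====
theorem find_nearest_day_py_spec : Claim_equal_find_nearest_day_py := by
  intro s days _ hpre
  obtain ⟨hs1, hs2⟩ := hpre
  unfold Spec_find_nearest_day_py
  have hmain := pvFindLoop_eq_scan days s hs1 hs2 367 s hs1 hs2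
    (by rw [if_pos le_rfl]; omega)
  rw [if_pos le_rfl] at hmain
  have hscan1 : pvScan days s s.toNat =
      PySem.List.max? ((PySem.List.pyRange 1 (s + 1) 1).filter
        (fun n => (pvLookup days (PySem.Int.toStr n)).isSome)) (fun x => x) := by
    have h := pvScan_eq_max days s.toNat s
    rw [show s + 1 - ((s.toNat : Nat) : Int) = 1 by omega] at h
    exact h
  have hscan2 : pvScan days 366 (366 - s).toNat =
      PySem.List.max? ((PySem.List.pyRange (s + 1) 367 1).filter
        (fun n => (pvLookup days (PySem.Int.toStr n)).isSome)) (fun x => x) := by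
    have h := pvScan_eq_max days (366 - s).toNat 366
    rw [show (366 : Int) + 1 - (((366 - s).toNat : Nat) : Int) = s + 1 by omega,
        show (366 : Int) + 1 = 367 by norm_num] at h
    exact h
  have hsplit : (PySem.List.pyRange 1 367 1).filter
        (fun n => (pvLookup days (PySem.Int.toStr n)).isSome) =
      (PySem.List.pyRange 1 (s + 1) 1).filter
        (fun n => (pvLookup days (PySem.Int.toStr n)).isSome) ++
      (PySem.List.pyRange (s + 1) 367 1).filter
        (fun n => (pvLookup days (PySem.Int.toStr n)).isSome) := by
    rw [PySem.List.pyRange_one_append 1 (s + 1) 367 (by omega) (by omega), List.filter_append]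
  have hprior : ((PySem.List.pyRange 1 (s + 1) 1).filter
        (fun n => (pvLookup days (PySem.Int.toStr n)).isSome) ++
      (PySem.List.pyRange (s + 1) 367 1).filter
        (fun n => (pvLookup days (PySem.Int.toStr n)).isSome)).filter
        (fun n => decide (n ≤ s)) =
      (PySem.List.pyRange 1 (s + 1) 1).filter
        (fun n => (pvLookup days (PySem.Int.toStr n)).isSome) := by
    rw [List.filter_append]
    have h1 : ((PySem.List.pyRange 1 (s + 1) 1).filter
        (fun n => (pvLookup days (PySem.Int.toStr n)).isSome)).filter
        (fun n => decide (n ≤ s)) =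
        (PySem.List.pyRange 1 (s + 1) 1).filter
        (fun n => (pvLookup days (PySem.Int.toStr n)).isSome) := by
      apply List.filter_eq_self.mpr
      intro x hx
      have := PySem.List.mem_pyRange_one.mp (List.mem_of_mem_filter hx)
      simp; omega
    have h2 : ((PySem.List.pyRange (s + 1) 367 1).filter
        (fun n => (pvLookup days (PySem.Int.toStr n)).isSome)).filter
        (fun n => decide (n ≤ s)) = [] := by
      apply List.filter_eq_nil_iff.mpr
      intro x hx
      have := PySem.List.mem_pyRange_one.mp (List.mem_of_mem_filter hx)
      simp; omega
    rw [h1, h2, List.append_nil]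
  rw [show find_nearest_day_py s days = pvFindLoop days s s 367 from rfl, hmain, hscan1, hscan2]
  simp only [find_nearest_day_py_alt]
  rw [hsplit, hprior]
  cases hA1 : (PySem.List.pyRange 1 (s + 1) 1).filter
      (fun n => (pvLookup days (PySem.Int.toStr n)).isSome) with
  | nil =>
    rw [hA1] at hprior
    cases hA2 : (PySem.List.pyRange (s + 1) 367 1).filter
        (fun n => (pvLookup days (PySem.Int.toStr n)).isSome) with
    | nil =>
      simp [(PySem.List.max?_eq_none_iff _ _).mpr rfl]
    | cons h2 t2 =>
      have hne : h2 :: t2 ≠ [] := by simp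
      obtain ⟨m, hm⟩ : ∃ m, PySem.List.max? (h2 :: t2) (fun x => x) = some m := by
        cases hh : PySem.List.max? (h2 :: t2) (fun x => x) with
        | none => exact absurd ((PySem.List.max?_eq_none_iff _ _).mp hh) hne
        | some m => exact ⟨m, rfl⟩
      rw [hm]
      simp [hm, (PySem.List.max?_eq_none_iff (κ := Int) [] (fun x => x)).mpr rfl]
  | cons h1 t1 =>
    have hne : h1 :: t1 ≠ [] := by simp
    obtain ⟨m, hm⟩ : ∃ m, PySem.List.max? (h1 :: t1) (fun x => x) = some m := by
      cases hh : PySem.List.max? (h1 :: t1) (fun x => x) with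
      | none => exact absurd ((PySem.List.max?_eq_none_iff _ _).mp hh) hne
      | some m => exact ⟨m, rfl⟩
    rw [hm, Option.some_or]
    simp [hm]
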